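-- pv_equiv track=rewrite | github.com/xiangpasama/redteam_evil_domain | redteam_evil_domain_plus.py | generate_domain_variations
-- ===== SOURCE A (Python) =====
-- def generate_domain_variations(domain, tlds, possible_chars):
--     unique_domains = set()
--
--     # 替换字符
--     for i, char in enumerate(domain):
--         for replacement in possible_chars:
--             new_domain_part = domain[:i] + replacement + domain[i+1:]
--             for tld in tlds:
--                 new_domain = f"{new_domain_part}.{tld}"
--                 unique_domains.add(new_domain)
--
--     # 删除字符
--     for i in range(len(domain)):
--         new_domain_part = domain[:i] + domain[i+1:]
--         for tld in tlds:
--             new_domain = f"{new_domain_part}.{tld}"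
--             unique_domains.add(new_domain)
--
--     # 插入字符的函数
--     def insert_chars(base_chars, possible_chars):
--         for i in range(len(base_chars) + 1):
--             for char in possible_chars:
--                 new_domain_part = base_chars[:i] + char + base_chars[i:]
--                 yield new_domain_part
--
--     # 插入字符
--     for new_domain_part in insert_chars(domain, possible_chars):
--         for tld in tlds:
--             new_domain = f"{new_domain_part}.{tld}"
--             unique_domains.add(new_domain)
--
--     return unique_domains
-- ===== SOURCE B (Python) =====
-- def generate_domain_variations(domain, tlds, possible_chars):
--     # One iterative zipper sweep over the string (a prefix/suffix walk, no
--     # index slicing) collects the substitution, deletion and insertion parts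
--     # in a single pass; then one cartesian pass appends the TLDs.
--     subs, dels, inss = [], [], []
--     pre, suf = "", domain
--     while True:
--         for c in possible_chars:
--             inss.append(pre + c + suf)
--         if not suf:
--             break
--         for c in possible_chars:
--             subs.append(pre + c + suf[1:])
--         dels.append(pre + suf[1:])
--         pre, suf = pre + suf[0], suf[1:]
--     unique_domains = set()
--     for part in subs + dels + inss:
--         for tld in tlds:
--             unique_domains.add(f"{part}.{tld}")
--     return unique_domains
-- ===== Notes on version B (the rewrite author's own statement) =====
-- stated objective: alternative
-- what changed: A runs three separate index loops, each recomputing domain[:i]/domain[i+1:] slices and each carrying its own inner TLD loop that fills the set; B replaces them by a single iterative zipper sweep (a prefix/suffix walk with no index arithmetic or slicing) that collects the substitution, deletion and insertion parts in one pass, followed by one cartesian pass that appends the TLDs.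
import Mathlib
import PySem

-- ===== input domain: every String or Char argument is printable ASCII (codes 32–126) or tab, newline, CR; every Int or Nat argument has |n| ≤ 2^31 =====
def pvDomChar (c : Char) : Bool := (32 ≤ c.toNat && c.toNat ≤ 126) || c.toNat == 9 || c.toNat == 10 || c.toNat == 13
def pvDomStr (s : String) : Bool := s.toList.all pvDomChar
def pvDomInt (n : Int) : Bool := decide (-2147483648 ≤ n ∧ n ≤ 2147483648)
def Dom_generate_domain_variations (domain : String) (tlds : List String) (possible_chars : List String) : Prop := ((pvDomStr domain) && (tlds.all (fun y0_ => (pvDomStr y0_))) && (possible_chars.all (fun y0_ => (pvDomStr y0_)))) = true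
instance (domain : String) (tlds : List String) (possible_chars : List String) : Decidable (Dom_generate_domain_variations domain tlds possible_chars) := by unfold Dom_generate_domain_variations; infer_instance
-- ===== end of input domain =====

-- B replaces A's three index-and-slice loops (each with its own TLD loop filling
-- the set) by one iterative prefix/suffix zipper sweep that collects all three
-- edit families in a single pass, then one cartesian pass appends the TLDs.
-- Objective: alternative structure, same cost.

-- ===== PORT A =====
def generate_domain_variations (domain : String) (tlds : List String) (possible_chars : List String) : List String :=
  let unique_domains : PySem.Set String := PySem.Set.empty
  -- 替换字符 (substitute a character)
  let unique_domains :=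
    (PySem.List.enumerate domain.toList).foldl (fun ud ic =>
      possible_chars.foldl (fun ud replacement =>
        let new_domain_part :=
          PySem.Str.slice domain none (some ic.1) ++ replacement ++
            PySem.Str.slice domain (some (ic.1 + 1)) none
        tlds.foldl (fun ud tld => PySem.Set.add ud (new_domain_part ++ "." ++ tld)) ud) ud)
      unique_domains
  -- 删除字符 (delete a character)
  let unique_domains :=
    (PySem.List.pyRange 0 (PySem.Str.len domain) 1).foldl (fun ud i =>
      let new_domain_part :=
        PySem.Str.slice domain none (some i) ++ PySem.Str.slice domain (some (i + 1)) none
      tlds.foldl (fun ud tld => PySem.Set.add ud (new_domain_part ++ "." ++ tld)) ud)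
      unique_domains
  -- 插入字符 (the generator insert_chars, materialized in yield order)
  let insert_chars :=
    (PySem.List.pyRange 0 (PySem.Str.len domain + 1) 1).flatMap (fun i =>
      possible_chars.map (fun char =>
        PySem.Str.slice domain none (some i) ++ char ++ PySem.Str.slice domain (some i) none))
  let unique_domains :=
    insert_chars.foldl (fun ud new_domain_part =>
      tlds.foldl (fun ud tld => PySem.Set.add ud (new_domain_part ++ "." ++ tld)) ud)
      unique_domains
  unique_domains

-- ===== PORT B =====
-- the while loop of Source B: structural recursion on the suffix of the zipper;
-- 'pre'/'suf' are the prefix/suffix strings (as code-point lists), the result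
-- is the (subs, dels, inss) triple the loop accumulates.
def pvSweep (possible_chars : List String) (pre suf : List Char) :
    List String × List String × List String :=
  let ins := possible_chars.map (fun c => String.ofList pre ++ c ++ String.ofList suf)
  match suf with
  | [] => ([], [], ins)
  | h :: rest =>
      let subs := possible_chars.map (fun c => String.ofList pre ++ c ++ String.ofList rest)
      let del := String.ofList pre ++ String.ofList rest
      let (s, d, i) := pvSweep possible_chars (pre ++ [h]) rest
      (subs ++ s, del :: d, ins ++ i)

def generate_domain_variations_alt (domain : String) (tlds : List String) (possible_chars : List String) : List String :=
  let swept := pvSweep possible_chars [] domain.toList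
  let subs := swept.1
  let dels := swept.2.1
  let inss := swept.2.2
  (subs ++ dels ++ inss).foldl (fun ud part =>
    tlds.foldl (fun ud tld => PySem.Set.add ud (part ++ "." ++ tld)) ud) PySem.Set.empty

-- ===== PRECONDITION & SPEC =====
def Spec_generate_domain_variations (domain : String) (tlds : List String) (possible_chars : List String) (out : List String) : Prop := out = generate_domain_variations_alt domain tlds possible_chars
instance (domain : String) (tlds : List String) (possible_chars : List String) (out : List String) : Decidable (Spec_generate_domain_variations domain tlds possible_chars out) := by unfold Spec_generate_domain_variations; infer_instance

-- ===== CLAIM (what is proved, stated in full; the proofs are below) =====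
def Claim_equal_generate_domain_variations : Prop := ∀ (domain : String) (tlds : List String) (possible_chars : List String), Dom_generate_domain_variations domain tlds possible_chars → Spec_generate_domain_variations domain tlds possible_chars (generate_domain_variations domain tlds possible_chars)

-- ===== LEMMAS AND PROOFS =====

-- the block of full domains one part contributes
def pvBlock (tlds : List String) (p : String) : List String := tlds.map (fun t => p ++ "." ++ t)

lemma pv_block_foldl (tlds : List String) (p : String) (s : PySem.Set String) :
    tlds.foldl (fun ud t => PySem.Set.add ud (p ++ "." ++ t)) s =
      PySem.Set.update s (pvBlock tlds p) := by
  simpa [pvBlock] using (PySem.Set.update_map_eq_foldl_add (l := tlds)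
    (f := fun t => p ++ "." ++ t) (s := s)).symm

lemma pv_foldl_update {α β : Type} [BEq β] (l : List α) (h : α → List β)
    (s : PySem.Set β) :
    l.foldl (fun s x => PySem.Set.update s (h x)) s = PySem.Set.update s (l.flatMap h) := by
  induction l generalizing s with
  | nil => simp [PySem.Set.update]
  | cons x xs ih => simp [ih, PySem.Set.update_append]

-- the parts A's three phases produce, in A's order (slice/pyRange form)
def pvPartsA (domain : String) (possible_chars : List String) : List String :=
  (PySem.List.pyRange 0 (PySem.Str.len domain) 1).flatMap (fun i =>
      possible_chars.map (fun r =>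
        PySem.Str.slice domain none (some i) ++ r ++
          PySem.Str.slice domain (some (i + 1)) none))
  ++ (PySem.List.pyRange 0 (PySem.Str.len domain) 1).map (fun i =>
      PySem.Str.slice domain none (some i) ++ PySem.Str.slice domain (some (i + 1)) none)
  ++ (PySem.List.pyRange 0 (PySem.Str.len domain + 1) 1).flatMap (fun i =>
      possible_chars.map (fun c =>
        PySem.Str.slice domain none (some i) ++ c ++ PySem.Str.slice domain (some i) none))

lemma pv_A_eq (domain : String) (tlds : List String) (possible_chars : List String) :
    generate_domain_variations domain tlds possible_chars =
      PySem.Set.update PySem.Set.empty ((pvPartsA domain possible_chars).flatMap (pvBlock tlds)) := by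
  unfold generate_domain_variations pvPartsA
  simp only [pv_block_foldl, pv_foldl_update, List.flatMap_append, PySem.Set.update_append]
  congr 2
  rw [PySem.List.enumerate_eq_map_pyRange (d := ' '), List.flatMap_assoc]
  simp [List.flatMap_map, PySem.List.len, PySem.Str.len]
  simp [List.flatMap_map]

-- characterisation of the zipper sweep by position indices
lemma pvSweep_spec (possible_chars : List String) (suf pre : List Char) :
    pvSweep possible_chars pre suf =
      ((List.range suf.length).flatMap (fun i => possible_chars.map (fun c =>
          String.ofList (pre ++ suf.take i) ++ c ++ String.ofList (suf.drop (i + 1)))),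
       (List.range suf.length).map (fun i =>
          String.ofList (pre ++ suf.take i) ++ String.ofList (suf.drop (i + 1))),
       (List.range (suf.length + 1)).flatMap (fun i => possible_chars.map (fun c =>
          String.ofList (pre ++ suf.take i) ++ c ++ String.ofList (suf.drop i)))) := by
  induction suf generalizing pre with
  | nil => simp [pvSweep]
  | cons h rest ih =>
    simp only [pvSweep, ih, Prod.mk.injEq, List.length_cons]
    refine ⟨?_, ?_, ?_⟩
    · rw [List.range_succ_eq_map, List.flatMap_cons, List.flatMap_map]
      simp [List.take_succ_cons, List.drop_succ_cons, List.append_assoc]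
    · rw [List.range_succ_eq_map, List.map_cons, List.map_map]
      simp [List.take_succ_cons, List.drop_succ_cons, List.append_assoc]
    · conv_rhs => rw [List.range_succ_eq_map]
      rw [List.flatMap_cons, List.flatMap_map]
      simp [List.take_succ_cons, List.drop_succ_cons, List.append_assoc]

lemma pv_slice_take (s : String) (i : Nat) :
    PySem.Str.slice s none (some (i : Int)) = String.ofList (s.toList.take i) := by
  simp [PySem.Str.slice]

lemma pv_slice_drop (s : String) (i : Nat) :
    PySem.Str.slice s (some (i : Int)) none = String.ofList (s.toList.drop i) := by
  simp [PySem.Str.slice]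

lemma pv_slice_drop1 (s : String) (i : Nat) :
    PySem.Str.slice s (some ((i : Int) + 1)) none = String.ofList (s.toList.drop (i + 1)) := by
  rw [show ((i : Int) + 1) = ((i + 1 : Nat) : Int) by push_cast; ring, pv_slice_drop]

lemma pv_parts_eq (domain : String) (possible_chars : List String) :
    (pvSweep possible_chars [] domain.toList).1
      ++ (pvSweep possible_chars [] domain.toList).2.1
      ++ (pvSweep possible_chars [] domain.toList).2.2
      = pvPartsA domain possible_chars := by
  rw [pvSweep_spec]
  dsimp only
  unfold pvPartsA
  refine congrArg₂ (· ++ ·) (congrArg₂ (· ++ ·) ?_ ?_) ?_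
  · rw [PySem.List.pyRange_one, PySem.Str.len_eq]
    rw [List.flatMap_map]
    simp only [Int.sub_zero, Int.toNat_natCast]
    refine List.flatMap_congr ?_
    intro i hi
    simp only [zero_add, List.nil_append]
    simp [pv_slice_take, pv_slice_drop1]
  · rw [PySem.List.pyRange_one, PySem.Str.len_eq]
    rw [List.map_map]
    simp only [Int.sub_zero, Int.toNat_natCast]
    refine List.map_congr_left ?_
    intro i hi
    simp only [Function.comp_def, zero_add, List.nil_append]
    simp [pv_slice_take, pv_slice_drop1]
  · rw [PySem.List.pyRange_one, PySem.Str.len_eq]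
    rw [List.flatMap_map]
    rw [show (((domain.toList.length : Int) + 1 - 0).toNat) = domain.toList.length + 1 by omega]
    refine List.flatMap_congr ?_
    intro i hi
    simp only [zero_add, List.nil_append]
    simp [pv_slice_take, pv_slice_drop]

lemma pv_B_eq (domain : String) (tlds : List String) (possible_chars : List String) :
    generate_domain_variations_alt domain tlds possible_chars =
      PySem.Set.update PySem.Set.empty ((pvPartsA domain possible_chars).flatMap (pvBlock tlds)) := by
  unfold generate_domain_variations_alt
  simp only [pv_block_foldl, pv_foldl_update]
  rw [pv_parts_eq]

-- ===== VERDICT (by name: the statement is the Claim_ definition above) =====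
theorem generate_domain_variations_spec : Claim_equal_generate_domain_variations := by
  intro domain tlds possible_chars _
  unfold Spec_generate_domain_variations
  rw [pv_A_eq, pv_B_eq]
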